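-- pv_equiv track=rewrite | github.com/simonfqy/SimonfqyGitHub | lintcode/medium/45_maximum_subarray_difference.py | maxDiffSubArrays
-- ===== SOURCE A (Python) =====
-- def maxDiffSubArrays(nums):
--     n = len(nums)
--     min_sum_on_left, min_sum_on_right = [0] * n, [0] * n
--     max_sum_on_left, max_sum_on_right = [0] * n, [0] * n
--     min_sum_on_left[0] = max_sum_on_left[0] = nums[0]
--     max_sum_on_right[n - 1] = min_sum_on_right[n - 1] = nums[n - 1]
--     current_subarray_sum_min = current_subarray_sum_max = nums[0]
--     for i in range(1, n):
--         # Greedy algorithm: current_subarray_sum_max is the sum of the maximum sum subarray ending at index i. If the current_subarray_sum_max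
--         # is not the largest sum subarray in nums[:i + 1], then it should be equal to max_sum_on_left[i - 1], which is a subarray ending at
--         # index i - 1 or earlier.
--         current_subarray_sum_max = max(current_subarray_sum_max + nums[i], nums[i])
--         current_subarray_sum_min = min(current_subarray_sum_min + nums[i], nums[i])
--         max_sum_on_left[i] = max(max_sum_on_left[i - 1], current_subarray_sum_max)
--         min_sum_on_left[i] = min(min_sum_on_left[i - 1], current_subarray_sum_min)
--     current_subarray_sum_min = current_subarray_sum_max = nums[n - 1]
--     for j in range(n - 2, -1, -1):
--         current_subarray_sum_max = max(current_subarray_sum_max + nums[j], nums[j])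
--         current_subarray_sum_min = min(current_subarray_sum_min + nums[j], nums[j])
--         max_sum_on_right[j] = max(max_sum_on_right[j + 1], current_subarray_sum_max)
--         min_sum_on_right[j] = min(min_sum_on_right[j + 1], current_subarray_sum_min)
--     max_diff = 0
--     for i in range(n - 1):
--         max_diff = max(max_diff, max_sum_on_left[i] - min_sum_on_right[i + 1], max_sum_on_right[i + 1] - min_sum_on_left[i])
--     return max_diff
-- ===== SOURCE B (Python) =====
-- def maxDiffSubArrays(nums):
--     # Prefix-sum formulation: every subarray sum is pre[b] - pre[a]; the best
--     # max/min subarray in a prefix/suffix comes from running extrema of pre[].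
--     n = len(nums)
--     pre = [0] * (n + 1)
--     for i in range(n):
--         pre[i + 1] = pre[i] + nums[i]
--     lmax, lmin = [0] * n, [0] * n
--     rmax, rmin = [0] * n, [0] * n
--     bmax = bmin = nums[0]
--     lo = hi = 0
--     for i in range(n):
--         bmax = max(bmax, pre[i + 1] - lo)
--         bmin = min(bmin, pre[i + 1] - hi)
--         lo = min(lo, pre[i + 1])
--         hi = max(hi, pre[i + 1])
--         lmax[i], lmin[i] = bmax, bmin
--     bmax = bmin = nums[n - 1]
--     top = bot = pre[n]
--     for j in range(n - 1, -1, -1):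
--         bmax = max(bmax, top - pre[j])
--         bmin = min(bmin, bot - pre[j])
--         top = max(top, pre[j])
--         bot = min(bot, pre[j])
--         rmax[j], rmin[j] = bmax, bmin
--     ans = 0
--     for i in range(n - 1):
--         ans = max(ans, lmax[i] - rmin[i + 1], rmax[i + 1] - lmin[i])
--     return ans
-- ===== Notes on version B (the rewrite author's own statement) =====
-- stated objective: alternative
-- what changed: B computes max/min subarray sums as differences of prefix sums, scanning one pre[] array with running minima/maxima of the prefix sums, instead of A's Kadane best-subarray-ending-here recurrences in both directions.
import Mathlib
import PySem

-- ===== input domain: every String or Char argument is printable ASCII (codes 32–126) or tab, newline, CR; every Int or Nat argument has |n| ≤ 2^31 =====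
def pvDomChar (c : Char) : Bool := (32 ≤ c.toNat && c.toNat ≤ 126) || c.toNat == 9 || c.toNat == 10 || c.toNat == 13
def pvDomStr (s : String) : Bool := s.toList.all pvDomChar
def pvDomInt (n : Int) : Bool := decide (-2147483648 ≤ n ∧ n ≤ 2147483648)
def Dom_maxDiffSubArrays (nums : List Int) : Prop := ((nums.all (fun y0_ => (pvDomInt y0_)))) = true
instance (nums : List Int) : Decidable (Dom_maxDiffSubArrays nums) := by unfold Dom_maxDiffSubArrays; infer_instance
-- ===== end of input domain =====

-- B replaces A's two-direction Kadane recurrences by a prefix-sum array scanned with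
-- running extrema; return values agree on all nonempty lists.

-- ===== PORT A =====
-- forward scan of A's first loop: state (curMax, curMin, lmax[i-1], lmin[i-1]),
-- emits (lmax[i], lmin[i]) for each remaining element
def fwdA (cm cn lm ln : Int) : List Int → List (Int × Int)
  | [] => []
  | x :: xs =>
    let cm' := max (cm + x) x
    let cn' := min (cn + x) x
    let lm' := max lm cm'
    let ln' := min ln cn'
    (lm', ln') :: fwdA cm' cn' lm' ln' xs

-- A's backward loop (j from n-2 down to 0): structural recursion that first processes the
-- suffix, then extends state leftwards; returns (curMax, curMin, rmax[j], rmin[j], list of (rmax, rmin))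
def bwdA : List Int → Int × Int × Int × Int × List (Int × Int)
  | [] => (0, 0, 0, 0, [])   -- unreachable under Pre_
  | [x] => (x, x, x, x, [(x, x)])
  | x :: y :: xs =>
    let s := bwdA (y :: xs)
    let cm' := max (s.1 + x) x
    let cn' := min (s.2.1 + x) x
    let rm' := max s.2.2.1 cm'
    let rn' := min s.2.2.2.1 cn'
    (cm', cn', rm', rn', (rm', rn') :: s.2.2.2.2)

-- A's final loop over i in range(n-1)
def finA (d : Int) : List ((Int × Int) × (Int × Int)) → Int
  | [] => d
  | ((lm, ln), (rm, rn)) :: rest => finA (max (max d (lm - rn)) (rm - ln)) rest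

def maxDiffSubArrays (nums : List Int) : Int :=
  match nums with
  | [] => 0   -- Python raises IndexError here; excluded by Pre_
  | x0 :: xs =>
    let left := (x0, x0) :: fwdA x0 x0 x0 x0 xs
    let right := (bwdA (x0 :: xs)).2.2.2.2
    finA 0 (List.zip left right.tail)

-- ===== PORT B =====
-- Source B's first loop: pre[1..n], built left to right (pre = 0 :: presums 0 nums)
def presums (p : Int) : List Int → List Int
  | [] => []
  | x :: xs => (p + x) :: presums (p + x) xs

-- Source B's forward loop over pre[i+1]: state (bmax, bmin, lo, hi), emits (lmax[i], lmin[i])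
def fwdB (bmax bmin lo hi : Int) : List Int → List (Int × Int)
  | [] => []
  | q :: qs =>
    let bmax' := max bmax (q - lo)
    let bmin' := min bmin (q - hi)
    (bmax', bmin') :: fwdB bmax' bmin' (min lo q) (max hi q) qs

-- Source B's backward loop over pre[j] (j descending): state (bmax, bmin, top, bot),
-- emits (rmax[j], rmin[j]) in descending-j order
def bwdB (bmax bmin top bot : Int) : List Int → List (Int × Int)
  | [] => []
  | q :: qs =>
    let bmax' := max bmax (top - q)
    let bmin' := min bmin (bot - q)
    (bmax', bmin') :: bwdB bmax' bmin' (max top q) (min bot q) qs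

-- Source B's final loop over i in range(n-1)
def finB (d : Int) : List ((Int × Int) × (Int × Int)) → Int
  | [] => d
  | ((lm, ln), (rm, rn)) :: rest => finB (max (max d (lm - rn)) (rm - ln)) rest

def maxDiffSubArrays_alt (nums : List Int) : Int :=
  match nums with
  | [] => 0   -- Python raises IndexError here; excluded by Pre_
  | x0 :: xs =>
    let pre : List Int := 0 :: presums 0 (x0 :: xs)
    let t := pre.getLastD 0                 -- pre[n]
    let xl := (x0 :: xs).getLastD 0         -- nums[n-1]
    let left := fwdB x0 x0 0 0 pre.tail
    let right := (bwdB xl xl t t pre.dropLast.reverse).reverse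
    finB 0 (List.zip left right.tail)

-- ===== PRECONDITION & SPEC =====
-- Pre_ excludes only the empty list, on which the Python A raises IndexError reading nums[0].
def Pre_maxDiffSubArrays (nums : List Int) : Prop := nums ≠ []
instance (nums : List Int) : Decidable (Pre_maxDiffSubArrays nums) := by
  unfold Pre_maxDiffSubArrays; infer_instance

def pvWitness_maxDiffSubArrays : List Int := [1, -2, 3]

def Spec_maxDiffSubArrays (nums : List Int) (out : Int) : Prop := out = maxDiffSubArrays_alt nums
instance (nums : List Int) (out : Int) : Decidable (Spec_maxDiffSubArrays nums out) := by
  unfold Spec_maxDiffSubArrays; infer_instance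

-- ===== CLAIM (what is proved, stated in full; the proofs are below) =====
def Claim_equal_maxDiffSubArrays : Prop := ∀ (nums : List Int), Dom_maxDiffSubArrays nums → Pre_maxDiffSubArrays nums → Spec_maxDiffSubArrays nums (maxDiffSubArrays nums)

-- ===== LEMMAS AND PROOFS =====

-- the two final loops are the same fold
theorem fin_eq (l : List ((Int × Int) × (Int × Int))) : ∀ d, finA d l = finB d l := by
  induction l with
  | nil => intro d; rfl
  | cons p rest ih =>
    intro d
    obtain ⟨⟨lm, ln⟩, rm, rn⟩ := p
    simp only [finA, finB]
    exact ih _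

theorem presums_append (a b : List Int) : ∀ p,
    presums p (a ++ b) = presums p a ++ presums (p + a.sum) b := by
  induction a with
  | nil => intro p; simp [presums]
  | cons x xs ih =>
    intro p
    simp only [List.cons_append, presums, List.sum_cons, ih (p + x), add_assoc]

theorem presums_reverse (l : List Int) : ∀ p,
    (p :: presums p l).reverse =
      (p + l.sum) :: (presums 0 l.reverse).map (fun q => p + l.sum - q) := by
  induction l with
  | nil => intro p; simp [presums]
  | cons x xs ih =>
    intro p
    have h1 : (p :: presums p (x :: xs)).reverse
        = ((p + x) :: presums (p + x) xs).reverse ++ [p] := by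
      simp [presums, List.reverse_cons]
    rw [h1, ih (p + x)]
    have h2 : presums 0 ((x :: xs).reverse) = presums 0 xs.reverse ++ [xs.sum + x] := by
      simp [List.reverse_cons, presums_append, presums]
    rw [h2]
    simp only [List.sum_cons, List.map_append, List.map_cons, List.map_nil, List.cons_append]
    rw [show p + x + xs.sum = p + (x + xs.sum) from by ring,
        show p + (x + xs.sum) - (xs.sum + x) = p from by ring]

theorem dropLast_reverse_eq {α : Type} (l : List α) : l.dropLast.reverse = l.reverse.tail := by
  induction l with
  | nil => rfl
  | cons x xs ih =>
    cases xs with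
    | nil => rfl
    | cons y ys =>
      simp only [List.dropLast_cons₂, List.reverse_cons] at *
      rw [ih]
      cases h : (ys.reverse ++ [y]) with
      | nil => simp at h
      | cons a b => simp

theorem getLastD_eq_reverse_head {α : Type} (l : List α) : ∀ d : α,
    l.getLastD d = l.reverse.headD d := by
  induction l with
  | nil => intro d; rfl
  | cons x xs ih =>
    intro d
    rw [List.getLastD_cons, ih x, List.reverse_cons]
    cases h : xs.reverse with
    | nil => rfl
    | cons a b => simp

-- core forward-scan equivalence: B's running-extrema-of-prefix-sums scan computes
-- exactly A's Kadane scan, under the state correspondence lo = min (p - cm) p, hi = max (p - cn) p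
theorem fwd_eq (xs : List Int) : ∀ cm cn lm ln p,
    fwdB lm ln (min (p - cm) p) (max (p - cn) p) (presums p xs) = fwdA cm cn lm ln xs := by
  induction xs with
  | nil => intro cm cn lm ln p; rfl
  | cons x rest ih =>
    intro cm cn lm ln p
    simp only [presums, fwdB, fwdA]
    have e1 : max lm (p + x - min (p - cm) p) = max lm (max (cm + x) x) := by omega
    have e2 : min ln (p + x - max (p - cn) p) = min ln (min (cn + x) x) := by omega
    have e3 : min (min (p - cm) p) (p + x) = min (p + x - max (cm + x) x) (p + x) := by omega
    have e4 : max (max (p - cn) p) (p + x) = max (p + x - min (cn + x) x) (p + x) := by omega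
    rw [e1, e2, e3, e4, ih]

-- the full forward scan on a nonempty list
theorem fwd_full (z0 : Int) (zs : List Int) :
    fwdB z0 z0 0 0 (presums 0 (z0 :: zs)) = (z0, z0) :: fwdA z0 z0 z0 z0 zs := by
  simp only [presums, fwdB, zero_add]
  have h1 : max z0 (z0 - 0) = z0 := by omega
  have h2 : min z0 (z0 - 0) = z0 := by omega
  have h3 : min 0 z0 = min (z0 - z0) z0 := by omega
  have h4 : max 0 z0 = max (z0 - z0) z0 := by omega
  rw [h1, h2, h3, h4, fwd_eq]

-- B's backward scan over t - q values is the forward scan over the q values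
theorem bwd_eq_fwd (qs : List Int) : ∀ bm bn top bot t,
    bwdB bm bn top bot (qs.map (fun q => t - q)) = fwdB bm bn (t - top) (t - bot) qs := by
  induction qs with
  | nil => intro bm bn top bot t; rfl
  | cons q rest ih =>
    intro bm bn top bot t
    simp only [List.map_cons, bwdB, fwdB]
    have e1 : max bm (top - (t - q)) = max bm (q - (t - top)) := by omega
    have e2 : min bn (bot - (t - q)) = min bn (q - (t - bot)) := by omega
    have e3 : (t - max top (t - q)) = min (t - top) q := by omega
    have e4 : (t - min bot (t - q)) = max (t - bot) q := by omega
    rw [e1, e2, ← e3, ← e4, ih]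

-- final state of A's forward scan
def fwdS (s : Int × Int × Int × Int) (l : List Int) : Int × Int × Int × Int :=
  l.foldl (fun s x =>
    let cm' := max (s.1 + x) x
    let cn' := min (s.2.1 + x) x
    (cm', cn', max s.2.2.1 cm', min s.2.2.2 cn')) s

theorem fwdA_append (l l' : List Int) : ∀ cm cn lm ln,
    fwdA cm cn lm ln (l ++ l') =
      fwdA cm cn lm ln l ++
        (let s := fwdS (cm, cn, lm, ln) l; fwdA s.1 s.2.1 s.2.2.1 s.2.2.2 l') := by
  induction l with
  | nil => intro cm cn lm ln; rfl
  | cons x xs ih =>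
    intro cm cn lm ln
    simp only [List.cons_append, fwdA, fwdS, List.foldl_cons]
    rw [ih]
    rfl

-- A's backward loop is the forward loop run on the reversed list, result reversed
theorem bwdA_eq (l : List Int) : ∀ y0 ys, l.reverse = y0 :: ys →
    bwdA l =
      (let s := fwdS (y0, y0, y0, y0) ys;
       (s.1, s.2.1, s.2.2.1, s.2.2.2, ((y0, y0) :: fwdA y0 y0 y0 y0 ys).reverse)) := by
  induction l with
  | nil => intro y0 ys h; simp at h
  | cons x xs ih =>
    intro y0 ys h
    cases xs with
    | nil =>
      simp at h
      obtain ⟨h1, h2⟩ := h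
      subst h1; subst h2
      rfl
    | cons y zs =>
      have hne : (y :: zs).reverse ≠ [] := by simp
      obtain ⟨z0, ws, hz⟩ : ∃ z0 ws, (y :: zs).reverse = z0 :: ws := by
        cases hrev : (y :: zs).reverse with
        | nil => exact absurd hrev hne
        | cons a b => exact ⟨a, b, rfl⟩
      have hrev : (x :: y :: zs).reverse = z0 :: (ws ++ [x]) := by
        simp [List.reverse_cons, hz]
      rw [h] at hrev
      injection hrev with hy0 hys
      subst hy0; subst hys
      show bwdA (x :: y :: zs) = _
      rw [bwdA, ih y0 ws hz]
      simp only [fwdA_append, fwdS, List.foldl_append, List.foldl_cons, List.foldl_nil,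
        List.reverse_append, List.reverse_cons]
      rfl

-- ===== VERDICT (by name: the statement is the Claim_ definition above) =====
theorem maxDiffSubArrays_spec : Claim_equal_maxDiffSubArrays := by
  intro nums _ hpre
  unfold Spec_maxDiffSubArrays
  cases nums with
  | nil => exact absurd rfl hpre
  | cons x0 xs =>
    obtain ⟨y0, ys, hrev⟩ : ∃ y0 ys, (x0 :: xs).reverse = y0 :: ys := by
      cases hr : (x0 :: xs).reverse with
      | nil => exact absurd hr (by simp)
      | cons a b => exact ⟨a, b, rfl⟩
    unfold maxDiffSubArrays maxDiffSubArrays_alt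
    simp only
    -- identify B's t and xl
    have hpr := presums_reverse (x0 :: xs) 0
    have ht : (0 :: presums 0 (x0 :: xs)).getLastD 0 = (x0 :: xs).sum := by
      rw [getLastD_eq_reverse_head, hpr]
      simp
    have hxl : (x0 :: xs).getLastD 0 = y0 := by
      rw [getLastD_eq_reverse_head, hrev]
      rfl
    -- B's left list = A's left list
    have hleft : fwdB x0 x0 0 0 (0 :: presums 0 (x0 :: xs)).tail
        = (x0, x0) :: fwdA x0 x0 x0 x0 xs := by
      simpa using fwd_full x0 xs
    -- B's descending right list = A's forward scan of the reversed list
    have hdrop : (0 :: presums 0 (x0 :: xs)).dropLast.reverse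
        = (presums 0 ((x0 :: xs).reverse)).map
            (fun q => (x0 :: xs).sum - q) := by
      rw [dropLast_reverse_eq, hpr]
      simp
    have hright : (bwdB ((x0 :: xs).getLastD 0) ((x0 :: xs).getLastD 0)
          ((0 :: presums 0 (x0 :: xs)).getLastD 0) ((0 :: presums 0 (x0 :: xs)).getLastD 0)
          (0 :: presums 0 (x0 :: xs)).dropLast.reverse).reverse
        = (bwdA (x0 :: xs)).2.2.2.2 := by
      rw [hxl, ht, hdrop, bwd_eq_fwd]
      have hz : (x0 :: xs).sum - (x0 :: xs).sum = (0 : Int) := by ring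
      rw [hz, hrev, fwd_full, bwdA_eq (x0 :: xs) y0 ys hrev]
    rw [hleft, ← hright, fin_eq]
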